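-- pv_equiv track=rewrite | github.com/DiegoMarquesETI/PENDU | PENDULE.py | Underscore
-- ===== SOURCE A (Python) =====
-- def Underscore(Mot):
--     L1 = Mot[0]
--     MotModif=""
--     for lettre in Mot :
--         if lettre == L1:
--             MotModif += L1
--         else :
--             MotModif += "_"
--     return MotModif
-- ===== SOURCE B (Python) =====
-- def Underscore(Mot):
--     L1 = Mot[0]
--     table = {ord(c): '_' for c in set(Mot) if c != L1}
--     return Mot.translate(table)
-- ===== Notes on version B (the rewrite author's own statement) =====
-- stated objective: idiomatic
-- what changed: Replaces the accumulating conditional loop with building a translation table over the distinct characters differing from the first letter, then one str.translate pass.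
import Mathlib
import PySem

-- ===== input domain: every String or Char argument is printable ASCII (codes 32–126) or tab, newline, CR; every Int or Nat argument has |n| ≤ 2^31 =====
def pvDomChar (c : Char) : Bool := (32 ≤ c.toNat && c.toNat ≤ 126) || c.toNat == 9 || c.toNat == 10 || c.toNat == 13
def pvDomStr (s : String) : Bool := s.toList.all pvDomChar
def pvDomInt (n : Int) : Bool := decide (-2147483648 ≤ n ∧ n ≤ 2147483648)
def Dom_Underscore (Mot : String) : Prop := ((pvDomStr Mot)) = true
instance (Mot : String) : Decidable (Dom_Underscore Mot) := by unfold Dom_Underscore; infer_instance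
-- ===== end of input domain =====

-- B replaces A's accumulating conditional loop with a translation table over the distinct
-- characters differing from the first letter, applied in one translate pass (idiomatic).

-- ===== PORT A =====
def Underscore (Mot : String) : String :=
  match PySem.Str.pyGet? Mot 0 with
  | none => ""    -- unreachable under Pre_ (Python raises IndexError)
  | some L1 =>
    String.mk (Mot.toList.foldl
      (fun MotModif lettre => if lettre == L1 then MotModif ++ [L1] else MotModif ++ ['_']) [])

-- ===== PORT B =====
def Underscore_alt (Mot : String) : String :=
  match PySem.Str.pyGet? Mot 0 with
  | none => ""    -- unreachable under Pre_ (Python raises IndexError)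
  | some L1 =>
    -- table = {ord(c): '_' for c in set(Mot) if c != L1}; then Mot.translate(table)
    let table : PySem.Set Char := (PySem.Set.ofList Mot.toList).filter (fun c => c != L1)
    String.mk (Mot.toList.map (fun c => if PySem.Set.contains table c then '_' else c))

-- ===== PRECONDITION & SPEC =====
-- Pre_ excludes exactly the empty string, on which Mot[0] raises IndexError in A (and in B).
def Pre_Underscore (Mot : String) : Prop := Mot ≠ ""
instance (Mot : String) : Decidable (Pre_Underscore Mot) := by unfold Pre_Underscore; infer_instance
def pvWitness_Underscore : String := "hello"

def Spec_Underscore (Mot : String) (out : String) : Prop := out = Underscore_alt Mot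
instance (Mot : String) (out : String) : Decidable (Spec_Underscore Mot out) := by unfold Spec_Underscore; infer_instance

-- ===== CLAIM (what is proved, stated in full; the proofs are below) =====
def Claim_equal_Underscore : Prop := ∀ (Mot : String), Dom_Underscore Mot → Pre_Underscore Mot → Spec_Underscore Mot (Underscore Mot)

-- ===== LEMMAS AND PROOFS =====

-- A's loop builds exactly the per-character map: L1 for a match, '_' otherwise.
theorem underscore_foldl_eq_map (l : List Char) (L1 : Char) (acc : List Char) :
    l.foldl (fun MotModif lettre => if lettre == L1 then MotModif ++ [L1] else MotModif ++ ['_']) acc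
      = acc ++ l.map (fun c => if c == L1 then L1 else '_') := by
  induction l generalizing acc with
  | nil => simp
  | cons x xs ih =>
    simp only [List.foldl_cons, List.map_cons, ih]
    by_cases h : x == L1 <;> simp [h]

-- membership in B's table, for characters of Mot
theorem mem_table_iff (l : List Char) (L1 c : Char) (hc : c ∈ l) :
    PySem.Set.contains ((PySem.Set.ofList l).filter (fun c => c != L1)) c = (c != L1) := by
  by_cases h : c = L1
  · subst h
    have h0 : PySem.Set.contains ((PySem.Set.ofList l).filter (fun d => d != c)) c = false := by
      rw [Bool.eq_false_iff]
      intro hcon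
      have hm := List.mem_filter.mp ((PySem.Set.contains_iff _ _).mp hcon)
      simp at hm
    rw [h0, bne_self_eq_false]
  · have hmem : c ∈ (PySem.Set.ofList l).filter (fun d => d != L1) :=
      List.mem_filter.mpr ⟨(PySem.Set.mem_ofList _ _).mpr hc, by simp [h]⟩
    rw [(PySem.Set.contains_iff _ _).mpr hmem]
    simp [h]

-- ===== VERDICT (by name: the statement is the Claim_ definition above) =====
theorem Underscore_spec : Claim_equal_Underscore := by
  intro Mot _ _
  show Underscore Mot = Underscore_alt Mot
  unfold Underscore Underscore_alt
  cases hL : PySem.Str.pyGet? Mot 0 with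
  | none => rfl
  | some L1 =>
    simp only [underscore_foldl_eq_map, List.nil_append]
    congr 1
    apply List.map_congr_left
    intro c hc
    rw [mem_table_iff Mot.toList L1 c hc]
    by_cases h : c = L1 <;> simp [h]
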